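-- pv_equiv track=rewrite | github.com/dtfalk/Solanus-Project-Pipeline | .not_edited_files/step_2/cropper.py | build_page_chunks
-- ===== SOURCE A (Python) =====
-- def build_page_chunks(page_numbers, chunk_size):
--     """Group page numbers into contiguous chunks with bounded size."""
--     if not page_numbers:
--         return []
--
--     ordered_pages = sorted(page_numbers)
--     chunks = []
--     current_chunk = [ordered_pages[0]]
--
--     for page_number in ordered_pages[1:]:
--         is_consecutive = page_number == current_chunk[-1] + 1
--         has_capacity = len(current_chunk) < chunk_size
--
--         if is_consecutive and has_capacity:
--             current_chunk.append(page_number)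
--         else:
--             chunks.append(current_chunk)
--             current_chunk = [page_number]
--
--     chunks.append(current_chunk)
--     return chunks
-- ===== SOURCE B (Python) =====
-- def build_page_chunks(page_numbers, chunk_size):
--     """Group page numbers into contiguous chunks with bounded size."""
--     pages = sorted(page_numbers)
--     step = max(chunk_size, 1)  # sizes below 1 degenerate to singleton chunks
--     # indices where a new maximal consecutive run starts
--     starts = [i for i in range(len(pages)) if i == 0 or pages[i] != pages[i - 1] + 1]
--     bounds = starts + [len(pages)]
--     out = []
--     for s, e in zip(bounds, bounds[1:]):
--         while s < e:
--             cut = min(s + step, e)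
--             out.append(pages[s:cut])
--             s = cut
--     return out
-- ===== Notes on version B (the rewrite author's own statement) =====
-- stated objective: alternative
-- what changed: A grows one current chunk element-by-element in a single stateful pass; B first computes the start indices of the maximal consecutive runs with an index comprehension and then cuts each run [start,end) into step-sized slices, where step = max(chunk_size,1) reproduces the singleton chunks A yields for chunk_size < 1.
import Mathlib
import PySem

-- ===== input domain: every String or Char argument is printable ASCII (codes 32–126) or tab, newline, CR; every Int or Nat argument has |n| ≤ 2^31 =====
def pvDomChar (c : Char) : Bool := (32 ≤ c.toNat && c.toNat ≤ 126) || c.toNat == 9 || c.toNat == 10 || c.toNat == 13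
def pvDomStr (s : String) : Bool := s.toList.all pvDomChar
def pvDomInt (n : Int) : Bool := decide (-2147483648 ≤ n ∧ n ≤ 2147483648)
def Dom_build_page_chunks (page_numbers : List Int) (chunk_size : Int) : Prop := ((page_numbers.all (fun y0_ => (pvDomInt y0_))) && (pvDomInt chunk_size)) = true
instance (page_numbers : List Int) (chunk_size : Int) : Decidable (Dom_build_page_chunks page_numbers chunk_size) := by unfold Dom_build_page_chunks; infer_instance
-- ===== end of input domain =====

-- B groups the sorted pages by precomputed run-start indices and slices each run,
-- instead of A's single stateful pass growing one current chunk; same values, no speed claim.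
-- (Neither implementation mutates its arguments: sorted() copies.)

-- ===== PORT A =====
def build_page_chunks (page_numbers : List Int) (chunk_size : Int) : List (List Int) :=
  if page_numbers = [] then []
  else
    let ordered := PySem.List.sorted page_numbers (fun x => x)
    -- ordered_pages[0]: ordered is nonempty here, so the index is in range
    let st := (PySem.List.slice ordered (some 1) none).foldl
      (fun (st : List (List Int) × List Int) p =>
        -- current_chunk[-1]: the current chunk is never empty, so the index is in range
        if p = PySem.List.pyGetD st.2 (-1) 0 + 1 ∧ (st.2.length : Int) < chunk_size
        then (st.1, st.2 ++ [p])
        else (st.1 ++ [st.2], [p]))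
      (([] : List (List Int)), [PySem.List.pyGetD ordered 0 0])
    st.1 ++ [st.2]

-- ===== PORT B =====
-- inner `while s < e` loop of Source B (emits the slices of one run); step = max(chunk_size, 1)
def pvEmit (pages : List Int) (chunk_size : Int) (s e : Int) : List (List Int) :=
  if h : s < e then
    PySem.List.slice pages (some s) (some (min (s + max chunk_size 1) e))
      :: pvEmit pages chunk_size (min (s + max chunk_size 1) e) e
  else []
termination_by (e - s).toNat
decreasing_by omega

def build_page_chunks_alt (page_numbers : List Int) (chunk_size : Int) : List (List Int) :=
  let pages := PySem.List.sorted page_numbers (fun x => x)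
  -- indices produced by range(len(pages)) are in bounds; `i == 0 or …` short-circuits
  let starts := (PySem.List.pyRange 0 (pages.length : Int) 1).filter
    (fun i => i == 0 || !(PySem.List.pyGet? pages i == (PySem.List.pyGet? pages (i - 1)).map (· + 1)))
  let bounds := starts ++ [(pages.length : Int)]
  (bounds.zip (PySem.List.slice bounds (some 1) none)).foldl
    (fun out se => out ++ pvEmit pages chunk_size se.1 se.2) []

-- ===== PRECONDITION & SPEC =====
def Spec_build_page_chunks (page_numbers : List Int) (chunk_size : Int) (out : List (List Int)) : Prop := out = build_page_chunks_alt page_numbers chunk_size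
instance (page_numbers : List Int) (chunk_size : Int) (out : List (List Int)) : Decidable (Spec_build_page_chunks page_numbers chunk_size out) := by unfold Spec_build_page_chunks; infer_instance

-- ===== CLAIM (what is proved, stated in full; the proofs are below) =====
def Claim_equal_build_page_chunks : Prop := ∀ (page_numbers : List Int) (chunk_size : Int), Dom_build_page_chunks page_numbers chunk_size → Spec_build_page_chunks page_numbers chunk_size (build_page_chunks page_numbers chunk_size)

-- ===== LEMMAS AND PROOFS =====

-- Proof-side middleman: the run/slice decomposition both ports are proved equal to.

-- length of the maximal consecutive run at the head
def pvRunLen : List Int → Nat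
  | p :: q :: t => if q = p + 1 then pvRunLen (q :: t) + 1 else 1
  | [_] => 1
  | [] => 0

-- length of the prefix of t that continues a run ending at `last`
def pvContLen (last : Int) : List Int → Nat
  | [] => 0
  | p :: t => if p = last + 1 then pvContLen p t + 1 else 0

-- cut one run into chunks of (max cs 1) elements
def pvSlices (cs : Int) : List Int → List (List Int)
  | [] => []
  | p :: r => (p :: r).take (max cs 1).toNat :: pvSlices cs (r.drop ((max cs 1).toNat - 1))
termination_by l => l.length
decreasing_by
  simp only [List.length_drop, List.length_cons]; omega

theorem pvRunLen_pos (l : List Int) (h : l ≠ []) : 1 ≤ pvRunLen l := by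
  match l with
  | [_] => simp [pvRunLen]
  | p :: q :: t => simp only [pvRunLen]; split <;> omega

theorem pvRunLen_le (l : List Int) : pvRunLen l ≤ l.length := by
  match l with
  | [] => simp [pvRunLen]
  | [_] => simp [pvRunLen]
  | p :: q :: t =>
    have := pvRunLen_le (q :: t)
    simp only [pvRunLen, List.length_cons] at *
    split <;> omega

def pvMid (cs : Int) (pages : List Int) : List (List Int) :=
  match h : pages with
  | [] => []
  | _ :: _ =>
    pvSlices cs (pages.take (pvRunLen pages)) ++ pvMid cs (pages.drop (pvRunLen pages))
termination_by pages.length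
decreasing_by
  have h1 : 1 ≤ pvRunLen pages := pvRunLen_pos pages (by simp [h])
  simp [h] at *; omega

-- A's loop as structural recursion
def pvALoop (cs : Int) (cur : List Int) : List Int → List (List Int)
  | [] => [cur]
  | p :: t =>
    if p = PySem.List.pyGetD cur (-1) 0 + 1 ∧ (cur.length : Int) < cs
    then pvALoop cs (cur ++ [p]) t
    else cur :: pvALoop cs [p] t

theorem pvRunLen_eq_contLen (p : Int) (t : List Int) :
    pvRunLen (p :: t) = pvContLen p t + 1 := by
  induction t generalizing p with
  | nil => simp [pvRunLen, pvContLen]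
  | cons q t ih => simp only [pvRunLen, pvContLen]; split <;> simp [ih]

theorem foldA (cs : Int) (t : List Int) (chunks : List (List Int)) (cur : List Int) :
    (t.foldl
      (fun (st : List (List Int) × List Int) p =>
        if p = PySem.List.pyGetD st.2 (-1) 0 + 1 ∧ (st.2.length : Int) < cs
        then (st.1, st.2 ++ [p])
        else (st.1 ++ [st.2], [p])) (chunks, cur)).1 ++
    [(t.foldl
      (fun (st : List (List Int) × List Int) p =>
        if p = PySem.List.pyGetD st.2 (-1) 0 + 1 ∧ (st.2.length : Int) < cs
        then (st.1, st.2 ++ [p])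
        else (st.1 ++ [st.2], [p])) (chunks, cur)).2] = chunks ++ pvALoop cs cur t := by
  induction t generalizing chunks cur with
  | nil => simp [pvALoop]
  | cons p t ih =>
    simp only [List.foldl_cons, pvALoop]
    split <;> simp [ih]

theorem pvSlices_eq_single (cs : Int) (cur : List Int) (h : cur ≠ [])
    (hle : cur.length ≤ (max cs 1).toNat) : pvSlices cs cur = [cur] := by
  match cur with
  | p :: r =>
    have hS : 1 ≤ (max cs 1).toNat := by omega
    simp only [List.length_cons] at hle
    simp only [pvSlices]
    rw [List.take_of_length_le (by simp only [List.length_cons]; omega),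
        List.drop_of_length_le (by omega)]
    simp [pvSlices]

theorem pvSlices_append (cs : Int) (cur X : List Int) (h : cur ≠ [])
    (hlen : cur.length = (max cs 1).toNat) (hX : X ≠ []) :
    pvSlices cs (cur ++ X) = cur :: pvSlices cs X := by
  match cur with
  | p :: r =>
    simp only [List.length_cons] at hlen
    have hS : (max cs 1).toNat = r.length + 1 := hlen.symm
    simp only [List.cons_append, pvSlices, hS, List.take_succ_cons,
      Nat.add_sub_cancel, List.take_left, List.drop_left]

theorem keyK (cs : Int) (t : List Int) : ∀ (cur : List Int) (x : Int),
    cur.getLast? = some x → cur.length ≤ (max cs 1).toNat →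
    pvALoop cs cur t =
      pvSlices cs (cur ++ t.take (pvContLen x t)) ++ pvMid cs (t.drop (pvContLen x t)) := by
  induction t with
  | nil =>
    intro cur x hx hle
    have hne : cur ≠ [] := by intro h; simp [h] at hx
    simp [pvALoop, pvContLen, pvMid, pvSlices_eq_single cs cur hne hle]
  | cons p t ih =>
    intro cur x hx hle
    have hne : cur ≠ [] := by intro h; simp [h] at hx
    have hlast : PySem.List.pyGetD cur (-1) 0 = x := by
      rw [PySem.List.pyGetD_neg_one cur 0 hne]
      rw [List.getLast?_eq_some_getLast hne] at hx
      exact Option.some.inj hx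
    simp only [pvALoop, hlast, pvContLen]
    by_cases hp : p = x + 1
    · by_cases hcap : (cur.length : Int) < cs
      · rw [if_pos ⟨hp, hcap⟩, if_pos hp]
        have hx' : (cur ++ [p]).getLast? = some p := by simp
        have hle' : (cur ++ [p]).length ≤ (max cs 1).toNat := by
          simp only [List.length_append, List.length_singleton]; omega
        rw [ih _ _ hx' hle']
        simp [List.take_succ_cons, List.drop_succ_cons, List.append_assoc]
      · rw [if_neg (by tauto), if_pos hp]
        have hpos : 0 < cur.length := List.length_pos_of_ne_nil hne
        have hcurS : cur.length = (max cs 1).toNat := by omega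
        rw [ih [p] p rfl (by simp only [List.length_singleton]; omega)]
        rw [List.take_succ_cons, List.drop_succ_cons]
        rw [show cur ++ p :: t.take (pvContLen p t) = cur ++ ([p] ++ t.take (pvContLen p t)) by simp]
        rw [pvSlices_append cs cur ([p] ++ t.take (pvContLen p t)) hne hcurS (by simp)]
        simp
    · rw [if_neg (by tauto), if_neg hp]
      rw [ih [p] p rfl (by simp only [List.length_singleton]; omega)]
      rw [List.take_zero, List.drop_zero, List.append_nil]
      rw [pvSlices_eq_single cs cur hne hle]
      conv_rhs => rw [pvMid]
      rw [pvRunLen_eq_contLen]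
      simp [List.take_succ_cons, List.drop_succ_cons]

theorem sorted_nil_of_nil (pn : List Int) (h : pn = []) :
    PySem.List.sorted pn (fun x => x) = [] := by
  subst h
  exact (PySem.List.sorted_perm _ _ _).eq_nil

theorem A_eq_mid (pn : List Int) (cs : Int) :
    build_page_chunks pn cs = pvMid cs (PySem.List.sorted pn (fun x => x)) := by
  by_cases h : pn = []
  · rw [sorted_nil_of_nil pn h]
    simp [build_page_chunks, h, pvMid]
  · have hne : PySem.List.sorted pn (fun x => x) ≠ [] := by
      intro he
      have hp := PySem.List.sorted_perm pn (fun x => x) false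
      rw [he] at hp
      exact h hp.symm.eq_nil
    obtain ⟨hh, tt, e⟩ := List.exists_cons_of_ne_nil hne
    simp only [build_page_chunks, if_neg h]
    rw [PySem.List.slice_from_one, e]
    simp only [List.tail_cons, PySem.List.pyGetD_zero_cons]
    rw [foldA]
    rw [keyK cs tt [hh] hh rfl (by simp only [List.length_singleton]; omega)]
    conv_rhs => rw [pvMid]
    rw [pvRunLen_eq_contLen]
    simp [List.take_succ_cons, List.drop_succ_cons]

-- run-start index facts
theorem pvRunLen_consec (l : List Int) (i : Nat) (h : i + 1 < pvRunLen l) :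
    l[i + 1]? = l[i]?.map (· + 1) := by
  match l with
  | [] => simp [pvRunLen] at h
  | [_] => simp [pvRunLen] at h
  | p :: q :: t =>
    simp only [pvRunLen] at h
    split at h
    · rename_i hq
      match i with
      | 0 => simp [hq]
      | j + 1 =>
        have := pvRunLen_consec (q :: t) j (by omega)
        simpa using this
    · omega

theorem pvRunLen_break (l : List Int) (h : pvRunLen l < l.length) :
    ¬ l[pvRunLen l]? = l[pvRunLen l - 1]?.map (· + 1) := by
  match l with
  | [] => simp [pvRunLen] at h
  | [_] => simp [pvRunLen] at h
  | p :: q :: t =>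
    by_cases hq : q = p + 1
    · simp only [pvRunLen, if_pos hq, List.length_cons] at h ⊢
      have h1 : 1 ≤ pvRunLen (q :: t) := pvRunLen_pos _ (by simp)
      have ihb := pvRunLen_break (q :: t) (by simp only [List.length_cons]; omega)
      have e2 : pvRunLen (q :: t) = (pvRunLen (q :: t) - 1) + 1 := by omega
      rw [Nat.add_sub_cancel, e2]
      simp only [List.getElem?_cons_succ]
      rw [e2] at ihb
      simp only [List.getElem?_cons_succ] at ihb
      exact ihb
    · simp only [pvRunLen, if_neg hq, List.length_cons] at h ⊢
      simpa using hq

-- B-side proof helpers: the run-start indices and bounds of Source B, as named definitions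
def pvP (l : List Int) : Int → Bool :=
  fun i => i == 0 || !(PySem.List.pyGet? l i == (PySem.List.pyGet? l (i - 1)).map (· + 1))

def pvStarts (pages : List Int) : List Int :=
  (PySem.List.pyRange 0 (pages.length : Int) 1).filter (pvP pages)

def pvBounds (pages : List Int) : List Int := pvStarts pages ++ [(pages.length : Int)]

def pvB (cs : Int) (pages : List Int) : List (List Int) :=
  ((pvBounds pages).zip (pvBounds pages).tail).flatMap (fun se => pvEmit pages cs se.1 se.2)

theorem pvP_inner (l : List Int) (j : Nat) (h1 : 1 ≤ j) (h2 : j < pvRunLen l) :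
    pvP l (j : Int) = false := by
  have e1 : PySem.List.pyGet? l (j : Int) = l[j]? := PySem.List.pyGet?_natCast l j
  have e2 : PySem.List.pyGet? l ((j : Int) - 1) = l[j - 1]? := by
    rw [show (j : Int) - 1 = ((j - 1 : Nat) : Int) by omega]
    exact PySem.List.pyGet?_natCast l (j - 1)
  have hc := pvRunLen_consec l (j - 1) (by omega)
  rw [show j - 1 + 1 = j by omega] at hc
  simp [pvP, e1, e2, hc]
  omega

theorem pvP_break (l : List Int) (h : pvRunLen l < l.length) :
    pvP l ((pvRunLen l : Nat) : Int) = true := by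
  have h1 : 1 ≤ pvRunLen l := pvRunLen_pos l (by intro he; rw [he] at h; simp [pvRunLen] at h)
  have e1 : PySem.List.pyGet? l ((pvRunLen l : Nat) : Int) = l[pvRunLen l]? :=
    PySem.List.pyGet?_natCast l _
  have e2 : PySem.List.pyGet? l (((pvRunLen l : Nat) : Int) - 1) = l[pvRunLen l - 1]? := by
    rw [show ((pvRunLen l : Nat) : Int) - 1 = ((pvRunLen l - 1 : Nat) : Int) by omega]
    exact PySem.List.pyGet?_natCast l _
  have hb := pvRunLen_break l h
  simp [pvP, e1, e2, hb]

theorem pvP_shift (l : List Int) (n k : Nat) (hk : 1 ≤ k) :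
    pvP l ((n + k : Nat) : Int) = pvP (l.drop n) ((k : Nat) : Int) := by
  have e1 : PySem.List.pyGet? l ((n : Int) + (k : Int)) = l[n + k]? := by
    rw [show (n : Int) + (k : Int) = ((n + k : Nat) : Int) by push_cast; ring]
    exact PySem.List.pyGet?_natCast l _
  have e2 : PySem.List.pyGet? l ((n : Int) + (k : Int) - 1) = l[n + k - 1]? := by
    rw [show (n : Int) + (k : Int) - 1 = ((n + k - 1 : Nat) : Int) by omega]
    exact PySem.List.pyGet?_natCast l _
  have e3 : PySem.List.pyGet? (l.drop n) ((k : Nat) : Int) = l[n + k]? := by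
    rw [PySem.List.pyGet?_natCast, List.getElem?_drop]
  have e4 : PySem.List.pyGet? (l.drop n) (((k : Nat) : Int) - 1) = l[n + k - 1]? := by
    rw [show ((k : Nat) : Int) - 1 = ((k - 1 : Nat) : Int) by omega,
        PySem.List.pyGet?_natCast, List.getElem?_drop,
        show n + (k - 1) = n + k - 1 by omega]
  have f1 : (((n : Int) + (k : Int)) == 0) = false := by
    simp only [beq_eq_false_iff_ne, ne_eq]; omega
  have f2 : (((k : Nat) : Int) == 0) = false := by
    simp only [beq_eq_false_iff_ne, ne_eq]; omega
  simp only [pvP]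
  push_cast
  rw [e1, e2, e3, e4, f1, f2]

theorem pvStarts_run (pages : List Int) (h : pages ≠ []) :
    pvStarts pages =
      0 :: (pvStarts (pages.drop (pvRunLen pages))).map (· + (pvRunLen pages : Int)) := by
  have hn1 : 1 ≤ pvRunLen pages := pvRunLen_pos pages h
  have hnle : pvRunLen pages ≤ pages.length := pvRunLen_le pages
  have hL1 : 1 ≤ pages.length := List.length_pos_of_ne_nil h
  have hsplit : PySem.List.pyRange 0 (pages.length : Int) 1 =
      PySem.List.pyRange 0 (pvRunLen pages : Int) 1 ++
      PySem.List.pyRange (pvRunLen pages : Int) (pages.length : Int) 1 :=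
    PySem.List.pyRange_one_append 0 _ _ (by positivity) (by exact_mod_cast hnle)
  rw [pvStarts, hsplit, List.filter_append]
  have h1 : (PySem.List.pyRange 0 (pvRunLen pages : Int) 1).filter (pvP pages) = [0] := by
    rw [PySem.List.pyRange_one_cons (by exact_mod_cast hn1)]
    rw [List.filter_cons_of_pos (by simp [pvP])]
    suffices hf : (PySem.List.pyRange (0 + 1) (pvRunLen pages : Int) 1).filter (pvP pages) = [] by
      rw [hf]
    apply List.filter_eq_nil_iff.mpr
    intro i hi
    rw [PySem.List.mem_pyRange_one] at hi
    have hcast : i = ((i.toNat : Nat) : Int) := by omega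
    rw [hcast, pvP_inner pages i.toNat (by omega) (by omega)]
    simp
  have h2 : (PySem.List.pyRange (pvRunLen pages : Int) (pages.length : Int) 1).filter (pvP pages)
      = (pvStarts (pages.drop (pvRunLen pages))).map (· + (pvRunLen pages : Int)) := by
    have hrl : (pages.drop (pvRunLen pages)).length = pages.length - pvRunLen pages :=
      List.length_drop
    rw [pvStarts, hrl]
    rw [PySem.List.pyRange_one (pvRunLen pages : Int) (pages.length : Int),
        PySem.List.pyRange_one 0 ((pages.length - pvRunLen pages : Nat) : Int)]
    rw [show ((pages.length : Int) - (pvRunLen pages : Int)).toNat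
          = pages.length - pvRunLen pages by omega]
    rw [show (((pages.length - pvRunLen pages : Nat) : Int) - 0).toNat
          = pages.length - pvRunLen pages by omega]
    rw [List.filter_map, List.filter_map, List.map_map]
    have hfc : List.filter (pvP (pages.drop (pvRunLen pages)) ∘ fun k : Nat => (0 : Int) + ↑k)
          (List.range (pages.length - pvRunLen pages))
        = List.filter (pvP pages ∘ fun k : Nat => (pvRunLen pages : Int) + ↑k)
          (List.range (pages.length - pvRunLen pages)) := by
      apply List.filter_congr
      intro k hkmem
      rw [List.mem_range] at hkmem
      simp only [Function.comp_apply, zero_add]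
      match k with
      | 0 =>
        have hnL : pvRunLen pages < pages.length := by omega
        simp only [Nat.cast_zero, add_zero]
        rw [pvP_break pages hnL]
        simp [pvP]
      | k + 1 =>
        rw [show ((pvRunLen pages : Int) + ((k + 1 : Nat) : Int))
              = ((pvRunLen pages + (k + 1) : Nat) : Int) by push_cast; ring]
        rw [pvP_shift pages (pvRunLen pages) (k + 1) (by omega)]
    rw [hfc]
    apply List.map_congr_left
    intro k hk
    simp only [Function.comp_apply, zero_add]
    ring
  rw [h1, h2]
  rfl

theorem pvBounds_run (pages : List Int) (h : pages ≠ []) :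
    pvBounds pages =
      0 :: (pvBounds (pages.drop (pvRunLen pages))).map (· + (pvRunLen pages : Int)) := by
  have hnle : pvRunLen pages ≤ pages.length := pvRunLen_le pages
  have hlen : (pages.length : Int) = ((pages.drop (pvRunLen pages)).length : Int)
      + (pvRunLen pages : Int) := by
    simp only [List.length_drop]; omega
  rw [pvBounds, pvBounds, pvStarts_run pages h, List.map_append, hlen]
  simp

theorem mem_pvBounds_nonneg (l : List Int) (x : Int) (hx : x ∈ pvBounds l) : 0 ≤ x := by
  rw [pvBounds, List.mem_append] at hx
  rcases hx with hx | hx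
  · rw [pvStarts, List.mem_filter] at hx
    have := (PySem.List.mem_pyRange_one).mp hx.1
    omega
  · simp at hx
    omega

theorem pvBounds_nil : pvBounds ([] : List Int) = [0] := by
  simp [pvBounds, pvStarts, PySem.List.pyRange_one_eq_nil (le_refl 0)]

-- unfold pvSlices once on a nonempty list, phrased with take/drop
theorem pvSlices_unfold (cs : Int) (X : List Int) (h : X ≠ []) :
    pvSlices cs X = X.take (max cs 1).toNat :: pvSlices cs (X.drop (max cs 1).toNat) := by
  match X with
  | p :: r =>
    have hS : 1 ≤ (max cs 1).toNat := by omega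
    have e : (max cs 1).toNat = ((max cs 1).toNat - 1) + 1 := by omega
    simp only [pvSlices]
    rw [e, List.drop_succ_cons, ← e]

theorem pvEmit_eq_slices (pages : List Int) (cs : Int) (b : Nat) (hb : b ≤ pages.length) :
    ∀ (k a : Nat), a ≤ b → b - a ≤ k →
      pvEmit pages cs (a : Int) (b : Int) = pvSlices cs ((pages.take b).drop a) := by
  intro k
  induction k with
  | zero =>
    intro a hab hk
    have hab' : a = b := by omega
    subst hab'
    rw [pvEmit, dif_neg (by omega)]
    rw [List.drop_of_length_le (by simp only [List.length_take]; omega)]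
    simp [pvSlices]
  | succ k ih =>
    intro a hab hk
    by_cases hlt : a < b
    · rw [pvEmit, dif_pos (by exact_mod_cast hlt)]
      have hS1 : (1 : Int) ≤ max cs 1 := le_max_right cs 1
      set St : Nat := (max cs 1).toNat with hSt
      have hStpos : 1 ≤ St := by omega
      have hmin : min ((a : Int) + max cs 1) (b : Int) = ((min (a + St) b : Nat) : Int) := by
        push_cast; omega
      have hX : (pages.take b).drop a ≠ [] := by
        intro hnil
        have := congrArg List.length hnil
        simp at this; omega
      rw [pvSlices_unfold cs _ hX]
      have hhead : PySem.List.slice pages (some (a : Int)) (some (min ((a : Int) + max cs 1) (b : Int)))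
          = ((pages.take b).drop a).take St := by
        rw [hmin, PySem.List.slice_toNat pages (by positivity) (by positivity),
            Int.toNat_natCast, Int.toNat_natCast, List.drop_take, List.take_take]
        congr 1
        all_goals omega
      rw [hhead, hmin]
      congr 1
      rw [ih (min (a + St) b) (by omega) (by omega)]
      congr 1
      rw [List.drop_drop]
      rcases le_or_gt (a + St) b with hc | hc
      · congr 1
        all_goals omega
      · have : min (a + St) b = b := by omega
        rw [this]
        rw [List.drop_of_length_le (by simp only [List.length_take]; omega), List.drop_of_length_le (by simp only [List.length_take]; omega)]
    · rw [pvEmit, dif_neg (by omega)]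
      rw [List.drop_of_length_le (by simp only [List.length_take]; omega)]
      simp [pvSlices]

theorem pvEmit_shift (u v : List Int) (cs : Int) :
    ∀ (k : Nat) (a b : Int), 0 ≤ a → (b - a).toNat ≤ k →
      pvEmit (u ++ v) cs (a + u.length) (b + u.length) = pvEmit v cs a b := by
  intro k
  induction k with
  | zero =>
    intro a b ha hk
    rw [pvEmit, dif_neg (by omega), pvEmit, dif_neg (by omega)]
  | succ k ih =>
    intro a b ha hk
    by_cases hlt : a < b
    · rw [pvEmit, dif_pos (by omega)]
      conv_rhs => rw [pvEmit, dif_pos hlt]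
      have hS1 : (1 : Int) ≤ max cs 1 := le_max_right cs 1
      have hmin : min ((a + u.length) + max cs 1) (b + (u.length : Int))
          = min (a + max cs 1) b + u.length := by omega
      rw [hmin]
      congr 1
      · rw [PySem.List.slice_toNat _ (by omega) (by omega),
            PySem.List.slice_toNat _ (by omega) (by omega)]
        have hd : (u ++ v).drop (a + (u.length : Int)).toNat = v.drop a.toNat := by
          have e : (a + (u.length : Int)).toNat = u.length + a.toNat := by omega
          rw [e, List.drop_append, List.drop_of_length_le (Nat.le_add_right _ _)]
          simp
        rw [hd]
        congr 1
        omega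
      · exact ih (min (a + max cs 1) b) b (by omega) (by omega)
    · rw [pvEmit, dif_neg (by omega), pvEmit, dif_neg (by omega)]

theorem pvB_nil (cs : Int) : pvB cs [] = [] := by
  simp [pvB, pvBounds_nil]

theorem pvB_eq_mid (cs : Int) (pages : List Int) : pvB cs pages = pvMid cs pages := by
  by_cases h : pages = []
  · subst h
    rw [pvB_nil]
    simp [pvMid]
  · have hn1 : 1 ≤ pvRunLen pages := pvRunLen_pos pages h
    have hnle : pvRunLen pages ≤ pages.length := pvRunLen_le pages
    have hL1 : 1 ≤ pages.length := List.length_pos_of_ne_nil h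
    have ihrest : pvB cs (pages.drop (pvRunLen pages)) = pvMid cs (pages.drop (pvRunLen pages)) :=
      pvB_eq_mid cs (pages.drop (pvRunLen pages))
    have hemit0 : pvEmit pages cs 0 ((pvRunLen pages : Nat) : Int)
        = pvSlices cs (pages.take (pvRunLen pages)) := by
      have := pvEmit_eq_slices pages cs (pvRunLen pages) hnle (pvRunLen pages) 0
        (Nat.zero_le _) (by omega)
      simpa using this
    have hmid : pvMid cs pages
        = pvSlices cs (pages.take (pvRunLen pages)) ++ pvMid cs (pages.drop (pvRunLen pages)) := by
      obtain ⟨ph, pt, hp⟩ := List.exists_cons_of_ne_nil h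
      rw [hp, pvMid]
    rw [hmid, pvB, pvBounds_run pages h]
    by_cases hrest : pages.drop (pvRunLen pages) = []
    · rw [hrest, pvBounds_nil]
      simp only [List.map_cons, List.map_nil, zero_add, List.tail_cons, List.zip_cons_cons,
        List.zip_nil_right, List.flatMap_cons, List.flatMap_nil, List.append_nil]
      rw [hemit0]
      simp [pvMid]
    · obtain ⟨bs, hbs⟩ : ∃ bs, pvBounds (pages.drop (pvRunLen pages)) = 0 :: bs :=
        ⟨_, by rw [pvBounds, pvStarts_run (pages.drop (pvRunLen pages)) hrest, List.cons_append]⟩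
      rw [hbs]
      simp only [List.map_cons, List.tail_cons, zero_add, List.zip_cons_cons, List.flatMap_cons]
      have hzm : ((pvRunLen pages : Int) :: bs.map (· + (pvRunLen pages : Int))).zip
            (bs.map (· + (pvRunLen pages : Int)))
          = (((0 : Int) :: bs).zip bs).map
              (Prod.map (· + (pvRunLen pages : Int)) (· + (pvRunLen pages : Int))) := by
        have : ((pvRunLen pages : Int) :: bs.map (· + (pvRunLen pages : Int)))
            = ((0 : Int) :: bs).map (· + (pvRunLen pages : Int)) := by simp
        rw [this, List.zip_map]
      rw [hzm, List.flatMap_map]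
      have hpoint : ∀ se ∈ ((0 : Int) :: bs).zip bs,
          pvEmit pages cs (se.1 + (pvRunLen pages : Int)) (se.2 + (pvRunLen pages : Int))
            = pvEmit (pages.drop (pvRunLen pages)) cs se.1 se.2 := by
        intro se hse
        have hm := List.of_mem_zip hse
        have h1 : 0 ≤ se.1 := by
          apply mem_pvBounds_nonneg (pages.drop (pvRunLen pages)) se.1
          rw [hbs]
          exact hm.1
        have hu : ((pages.take (pvRunLen pages)).length : Int) = (pvRunLen pages : Int) := by
          simp only [List.length_take]
          omega
        calc pvEmit pages cs (se.1 + (pvRunLen pages : Int)) (se.2 + (pvRunLen pages : Int))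
            = pvEmit (pages.take (pvRunLen pages) ++ pages.drop (pvRunLen pages)) cs
                (se.1 + ((pages.take (pvRunLen pages)).length : Int))
                (se.2 + ((pages.take (pvRunLen pages)).length : Int)) := by
              rw [List.take_append_drop, hu]
          _ = pvEmit (pages.drop (pvRunLen pages)) cs se.1 se.2 :=
              pvEmit_shift _ _ cs ((se.2 - se.1).toNat) se.1 se.2 h1 (le_refl _)
      have hflat : (((0 : Int) :: bs).zip bs).flatMap
            (fun se => pvEmit pages cs
              ((Prod.map (· + (pvRunLen pages : Int)) (· + (pvRunLen pages : Int)) se).1)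
              ((Prod.map (· + (pvRunLen pages : Int)) (· + (pvRunLen pages : Int)) se).2))
          = (((0 : Int) :: bs).zip bs).flatMap
            (fun se => pvEmit (pages.drop (pvRunLen pages)) cs se.1 se.2) := by
        rw [List.flatMap_def, List.flatMap_def]
        apply congrArg List.flatten
        apply List.map_congr_left
        intro se hse
        simp only [Prod.map_fst, Prod.map_snd]
        exact hpoint se hse
      rw [hflat]
      have hrestB : (((0 : Int) :: bs).zip bs).flatMap
            (fun se => pvEmit (pages.drop (pvRunLen pages)) cs se.1 se.2)
          = pvB cs (pages.drop (pvRunLen pages)) := by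
        rw [pvB, hbs, List.tail_cons]
      rw [hrestB, ihrest, hemit0]
termination_by pages.length
decreasing_by
  simp only [List.length_drop]
  omega

theorem B_eq_mid (pn : List Int) (cs : Int) :
    build_page_chunks_alt pn cs = pvMid cs (PySem.List.sorted pn (fun x => x)) := by
  rw [← pvB_eq_mid cs (PySem.List.sorted pn (fun x => x))]
  simp only [build_page_chunks_alt]
  rw [PySem.List.slice_from_one, PySem.List.foldl_append_eq_flatMap]
  rw [List.nil_append]
  rfl

-- ===== VERDICT (by name: the statement is the Claim_ definition above) =====
theorem build_page_chunks_spec : Claim_equal_build_page_chunks := by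
  intro pn cs _
  unfold Spec_build_page_chunks
  rw [A_eq_mid, B_eq_mid]
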